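-- pv_equiv track=rewrite | github.com/rdvnkdyf/codewars-practice | python/SendintheClones.py | clonewars
-- ===== SOURCE A (Python) =====
-- def clonewars(kata_per_day):
--     if kata_per_day <= 0:
--         return [1, 0]
--
--     num_clones = 1
--     total_katas_solved = 0
--
--     # Klonların yeteneği azaldığı için, kata çözme işlemi
--     # `kata_per_day`'den 1'e kadar her gün devam eder.
--     # Döngüyü `kata_per_day` gün boyunca çalıştıracağız.
--     for i in range(kata_per_day):
--         # Yetenek, her gün bir azalır.
--         current_kata_ability = kata_per_day - i
--
--         # Mevcut klonlar, o günkü yetenekleri kadar kata çözer.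
--         katas_solved_today = num_clones * current_kata_ability
--         total_katas_solved += katas_solved_today
--
--         # Klonlar, yetenekleri 1'in üzerinde olduğu sürece klonlama yapabilirler.
--         # Bu, son gün hariç her gün klonlama yapıldığı anlamına gelir.
--         if current_kata_ability > 1:
--             num_clones *= 2
--
--     return [num_clones, total_katas_solved]
-- ===== SOURCE B (Python) =====
-- def clonewars(kata_per_day):
--     if kata_per_day <= 0:
--         return [1, 0]
--     return [2 ** (kata_per_day - 1), 2 ** (kata_per_day + 1) - kata_per_day - 2]
-- ===== Notes on version B (the rewrite author's own statement) =====
-- stated objective: faster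
-- what changed: Replaced the day-by-day simulation loop with the closed forms num_clones = 2^(n-1) and total = 2^(n+1) - n - 2.
import Mathlib
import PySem

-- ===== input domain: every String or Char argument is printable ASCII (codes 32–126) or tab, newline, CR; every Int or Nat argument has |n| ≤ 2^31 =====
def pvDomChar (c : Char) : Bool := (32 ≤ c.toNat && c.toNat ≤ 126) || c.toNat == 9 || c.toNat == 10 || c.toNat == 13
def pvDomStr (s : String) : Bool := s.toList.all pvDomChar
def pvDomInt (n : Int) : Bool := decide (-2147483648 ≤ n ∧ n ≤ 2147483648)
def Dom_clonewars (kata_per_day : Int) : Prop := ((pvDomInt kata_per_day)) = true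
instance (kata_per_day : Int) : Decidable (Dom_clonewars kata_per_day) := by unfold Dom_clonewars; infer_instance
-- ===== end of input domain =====

-- B replaces A's day-by-day simulation loop with closed forms (num_clones = 2^(n-1),
-- total = 2^(n+1) - n - 2); equivalence of return values is proved for all inputs.

-- ===== PORT A =====
-- the loop body: state (num_clones, total_katas_solved), i the loop variable
def clonewarsStep (kata_per_day : Int) (s : Int × Int) (i : Int) : Int × Int :=
  let current_kata_ability := kata_per_day - i
  let katas_solved_today := s.1 * current_kata_ability
  let total := s.2 + katas_solved_today
  let num_clones := if current_kata_ability > 1 then s.1 * 2 else s.1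
  (num_clones, total)

def clonewars (kata_per_day : Int) : List Int :=
  if kata_per_day ≤ 0 then [1, 0]
  else
    let st := (PySem.List.pyRange 0 kata_per_day 1).foldl (clonewarsStep kata_per_day) (1, 0)
    [st.1, st.2]

-- ===== PORT B =====
def clonewars_alt (kata_per_day : Int) : List Int :=
  if kata_per_day ≤ 0 then [1, 0]
  else [2 ^ (kata_per_day - 1).toNat, 2 ^ (kata_per_day + 1).toNat - kata_per_day - 2]

-- ===== PRECONDITION & SPEC =====
def Spec_clonewars (kata_per_day : Int) (out : List Int) : Prop := out = clonewars_alt kata_per_day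
instance (kata_per_day : Int) (out : List Int) : Decidable (Spec_clonewars kata_per_day out) := by unfold Spec_clonewars; infer_instance

-- ===== CLAIM (what is proved, stated in full; the proofs are below) =====
def Claim_equal_clonewars : Prop := ∀ (kata_per_day : Int), Dom_clonewars kata_per_day → Spec_clonewars kata_per_day (clonewars kata_per_day)

-- ===== LEMMAS AND PROOFS =====

-- loop invariant: after j iterations (j ≤ k) the state is
-- (2 ^ min j (k-1).toNat, 2^j * (k - j + 2) - k - 2)
theorem clonewars_loop (k : Int) (j : Nat) (hj : (j : Int) ≤ k) :
    (PySem.List.pyRange 0 j 1).foldl (clonewarsStep k) (1, 0)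
      = (2 ^ (min j (k - 1).toNat), 2 ^ j * (k - j + 2) - k - 2) := by
  induction j with
  | zero =>
    simp only [Nat.cast_zero, PySem.List.pyRange_one_eq_nil (le_refl 0), List.foldl_nil,
      Nat.min_eq_left (Nat.zero_le _), pow_zero, Prod.mk.injEq]
    constructor
    · trivial
    · ring
  | succ j ih =>
    have hj' : (j : Int) ≤ k := by push_cast at hj ⊢; omega
    have hrange : PySem.List.pyRange 0 (((j : Nat) + 1 : Nat) : Int) 1
        = PySem.List.pyRange 0 j 1 ++ [(j : Int)] := by
      have := PySem.List.pyRange_one_succ_right (a := 0) (b := (j : Int)) (by positivity)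
      push_cast
      push_cast at this
      exact this
    have hmin : min j (k - 1).toNat = j := by omega
    rw [hrange, List.foldl_append, ih hj', hmin]
    simp only [List.foldl, clonewarsStep]
    by_cases hgt : k - (j : Int) > 1
    · have hmin2 : min (j + 1) (k - 1).toNat = j + 1 := by omega
      simp only [hgt, if_pos]
      rw [hmin2, Prod.mk.injEq]
      constructor
      · ring
      · push_cast; ring
    · have hkj : k = (j : Int) + 1 := by omega
      have hmin2 : min (j + 1) (k - 1).toNat = j := by omega
      simp only [hgt, if_neg, not_false_iff]
      rw [hmin2, Prod.mk.injEq]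
      constructor
      · rfl
      · push_cast; ring

-- ===== VERDICT (by name: the statement is the Claim_ definition above) =====
theorem clonewars_spec : Claim_equal_clonewars := by
  intro k _
  unfold Spec_clonewars clonewars clonewars_alt
  by_cases hk : k ≤ 0
  · simp [hk]
  · simp only [hk, if_neg, not_false_iff]
    have hk1 : (1 : Int) ≤ k := by omega
    have hkt : ((k.toNat : Nat) : Int) = k := Int.toNat_of_nonneg (by omega)
    rw [show PySem.List.pyRange 0 k 1 = PySem.List.pyRange 0 ((k.toNat : Nat) : Int) 1 from by
      rw [hkt]]
    rw [clonewars_loop k k.toNat (by omega)]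
    have hmin : min k.toNat (k - 1).toNat = (k - 1).toNat := by omega
    have h1 : (k + 1).toNat = k.toNat + 1 := by omega
    have h2 : (2 : Int) ^ k.toNat * (k - (k.toNat : Int) + 2) - k - 2
        = 2 ^ (k + 1).toNat - k - 2 := by rw [hkt, h1]; ring
    rw [hmin, h2]
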